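-- pv_equiv track=rewrite | github.com/heltonmaia/proj-question-generator | question_generator/questions_ch5/question_ch5_0068.py | analisar_estatisticas_numericas
-- ===== SOURCE A (Python) =====
-- from typing import List, Tuple
--
-- def analisar_estatisticas_numericas(numeros: List[int]) -> Tuple[int, int, int, int, int]:
--     """
--     Analisa uma lista de números inteiros e retorna a contagem de positivos, negativos, zeros, pares e ímpares.
--
--     Args:
--         numeros: Uma lista de números inteiros.
--
--     Returns:
--         Uma tupla contendo (count_positivos, count_negativos, count_zeros, count_pares, count_impares).
--     """
--     count_positivos = 0
--     count_negativos = 0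
--     count_zeros = 0
--     count_pares = 0
--     count_impares = 0
--
--     for num in numeros:
--         if num > 0:
--             count_positivos += 1
--         elif num < 0:
--             count_negativos += 1
--         else: # num == 0
--             count_zeros += 1
--
--         if num % 2 == 0:
--             count_pares += 1
--         else:
--             count_impares += 1
--
--     return count_positivos, count_negativos, count_zeros, count_pares, count_impares
-- ===== SOURCE B (Python) =====
-- from typing import List, Tuple
--
-- def analisar_estatisticas_numericas(numeros: List[int]) -> Tuple[int, int, int, int, int]:
--     # Five independent scans, one per statistic, instead of one branched accumulating loop.
--     count_positivos = sum(1 for n in numeros if n > 0)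
--     count_negativos = sum(1 for n in numeros if n < 0)
--     count_zeros = sum(1 for n in numeros if n == 0)
--     count_pares = sum(1 for n in numeros if n % 2 == 0)
--     count_impares = sum(1 for n in numeros if n % 2 != 0)
--     return count_positivos, count_negativos, count_zeros, count_pares, count_impares
-- ===== Notes on version B (the rewrite author's own statement) =====
-- stated objective: idiomatic
-- what changed: Replaces the single loop with five branched accumulators by five independent one-condition scans (generator expressions), one per statistic.
import Mathlib
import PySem

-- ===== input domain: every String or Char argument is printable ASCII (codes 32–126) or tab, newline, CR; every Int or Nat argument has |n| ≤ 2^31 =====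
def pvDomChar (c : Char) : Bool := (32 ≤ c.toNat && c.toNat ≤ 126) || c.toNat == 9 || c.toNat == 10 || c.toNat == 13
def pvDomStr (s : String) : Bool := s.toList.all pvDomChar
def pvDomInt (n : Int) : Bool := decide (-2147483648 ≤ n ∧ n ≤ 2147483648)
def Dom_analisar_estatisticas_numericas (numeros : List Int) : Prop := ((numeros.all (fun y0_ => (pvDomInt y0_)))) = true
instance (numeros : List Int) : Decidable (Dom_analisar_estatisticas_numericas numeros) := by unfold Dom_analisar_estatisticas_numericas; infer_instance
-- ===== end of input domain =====

-- ===== PORT A =====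
-- B replaces A's single branched loop by five independent countP scans (idiomatic decomposition).
def analisar_estatisticas_numericas (numeros : List Int) : Int × Int × Int × Int × Int :=
  numeros.foldl (fun acc num =>
    let (p, n, z, e, o) := acc
    let (p, n, z) :=
      if num > 0 then (p + 1, n, z)
      else if num < 0 then (p, n + 1, z)
      else (p, n, z + 1)
    if PySem.Int.mod num 2 = 0 then (p, n, z, e + 1, o)
    else (p, n, z, e, o + 1)) (0, 0, 0, 0, 0)

-- ===== PORT B =====
def analisar_estatisticas_numericas_alt (numeros : List Int) : Int × Int × Int × Int × Int :=
  ((numeros.countP (fun n => n > 0) : Int),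
   (numeros.countP (fun n => n < 0) : Int),
   (numeros.countP (fun n => n == 0) : Int),
   (numeros.countP (fun n => PySem.Int.mod n 2 == 0) : Int),
   (numeros.countP (fun n => PySem.Int.mod n 2 != 0) : Int))

-- ===== PRECONDITION & SPEC =====
def Spec_analisar_estatisticas_numericas (numeros : List Int) (out : Int × Int × Int × Int × Int) : Prop := out = analisar_estatisticas_numericas_alt numeros
instance (numeros : List Int) (out : Int × Int × Int × Int × Int) : Decidable (Spec_analisar_estatisticas_numericas numeros out) := by unfold Spec_analisar_estatisticas_numericas; infer_instance

-- ===== CLAIM (what is proved, stated in full; the proofs are below) =====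
def Claim_equal_analisar_estatisticas_numericas : Prop := ∀ (numeros : List Int), Dom_analisar_estatisticas_numericas numeros → Spec_analisar_estatisticas_numericas numeros (analisar_estatisticas_numericas numeros)

-- ===== LEMMAS AND PROOFS =====

-- ===== VERDICT (by name: the statement is the Claim_ definition above) =====
lemma pv_fold_acc (l : List Int) : ∀ (p n z e o : Int),
    l.foldl (fun acc num =>
      let (p, n, z, e, o) := acc
      let (p, n, z) :=
        if num > 0 then (p + 1, n, z)
        else if num < 0 then (p, n + 1, z)
        else (p, n, z + 1)
      if PySem.Int.mod num 2 = 0 then (p, n, z, e + 1, o)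
      else (p, n, z, e, o + 1)) (p, n, z, e, o)
    = (p + (l.countP (fun n => n > 0) : Int),
       n + (l.countP (fun n => n < 0) : Int),
       z + (l.countP (fun n => n == 0) : Int),
       e + (l.countP (fun n => PySem.Int.mod n 2 == 0) : Int),
       o + (l.countP (fun n => PySem.Int.mod n 2 != 0) : Int)) := by
  induction l with
  | nil => simp
  | cons x t ih =>
    intro p n z e o
    simp only [List.foldl_cons, List.countP_cons]
    rw [ih]
    by_cases h1 : x > 0
    · by_cases h3 : (2 : Int) ∣ x <;>
        simp [h1, h3, show ¬ x < 0 by omega,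
          show ¬ x = 0 by omega, Prod.ext_iff] <;> omega
    · by_cases h2 : x < 0
      · by_cases h3 : (2 : Int) ∣ x <;>
          simp [h1, h2, h3, show ¬ x = 0 by omega,
            Prod.ext_iff] <;> omega
      · have hx : x = 0 := by omega
        subst hx
        simp [Prod.ext_iff]; omega

theorem analisar_estatisticas_numericas_spec : Claim_equal_analisar_estatisticas_numericas := by
  intro numeros _
  unfold Spec_analisar_estatisticas_numericas analisar_estatisticas_numericas analisar_estatisticas_numericas_alt
  rw [pv_fold_acc]
  simp
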